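-- pv_equiv track=rewrite | github.com/hyunjongL/cs420_2017_fall | proj1.py | check_line
-- ===== SOURCE A (Python) =====
-- operators = ['*', '/', '+', '-']
--
-- def is_operator(x):
--     if x in operators:
--         return True
--     return False
--
-- def check_line(line):   #checks if a list of nodes has correct syntax
--     state = 0
--     for i in line:
--         if state == 0 and (not is_operator(i)):
--             state += 1
--             continue
--         elif state == 1 and is_operator(i):
--             state -= 1
--             continue
--         else:
--             return False
--     if state == 1:
--         return True
--     else :
--         return False
-- ===== SOURCE B (Python) =====
-- operators = ['*', '/', '+', '-']
--
-- def is_operator(x):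
--     return x in operators
--
-- def check_line(line):
--     line = list(line)
--     if len(line) % 2 == 0:
--         return False
--     return all(not is_operator(t) for t in line[0::2]) and \
--            all(is_operator(t) for t in line[1::2])
-- ===== Notes on version B (the rewrite author's own statement) =====
-- stated objective: simpler
-- what changed: Replaces the interleaved 0/1 state toggle with an odd-length check plus two all() passes over the even-index (operand) and odd-index (operator) slices.
import Mathlib
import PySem

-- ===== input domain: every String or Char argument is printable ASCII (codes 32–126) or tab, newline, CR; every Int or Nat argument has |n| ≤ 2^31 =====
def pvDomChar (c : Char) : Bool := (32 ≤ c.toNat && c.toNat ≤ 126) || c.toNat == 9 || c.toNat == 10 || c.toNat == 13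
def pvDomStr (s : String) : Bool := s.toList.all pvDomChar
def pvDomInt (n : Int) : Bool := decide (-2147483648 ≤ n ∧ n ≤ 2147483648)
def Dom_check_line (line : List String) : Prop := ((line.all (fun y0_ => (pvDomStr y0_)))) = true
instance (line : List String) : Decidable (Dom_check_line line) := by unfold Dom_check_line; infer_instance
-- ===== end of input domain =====

-- Header: B replaces A's interleaved state toggle with an odd-length check plus two
-- all-passes over the even-index (operand) and odd-index (operator) positions (simpler decomposition).

-- ===== PORT A =====
def pvOperators : List String := ["*", "/", "+", "-"]

def pvIsOperator (x : String) : Bool :=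
  if x ∈ pvOperators then true else false

-- the for-loop of A, with its 0/1 state and early return False
def pvCheckLoop : List String → Int → Bool
  | [], state => if state = 1 then true else false
  | i :: rest, state =>
    if state = 0 ∧ ¬ pvIsOperator i = true then pvCheckLoop rest (state + 1)
    else if state = 1 ∧ pvIsOperator i = true then pvCheckLoop rest (state - 1)
    else false

def check_line (line : List String) : Bool := pvCheckLoop line 0

-- ===== PORT B =====
-- line[0::2] and line[1::2]: every other element, exact for a step-2 slice
def pvEveryOther : List String → List String
  | [] => []
  | [a] => [a]
  | a :: _ :: r => a :: pvEveryOther r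

def check_line_alt (line : List String) : Bool :=
  if line.length % 2 = 0 then false
  else (pvEveryOther line).all (fun t => !pvIsOperator t)
       && (pvEveryOther (line.drop 1)).all (fun t => pvIsOperator t)

-- ===== PRECONDITION & SPEC =====
def Spec_check_line (line : List String) (out : Bool) : Prop := out = check_line_alt line
instance (line : List String) (out : Bool) : Decidable (Spec_check_line line out) := by unfold Spec_check_line; infer_instance

-- ===== CLAIM (what is proved, stated in full; the proofs are below) =====
def Claim_equal_check_line : Prop := ∀ (line : List String), Dom_check_line line → Spec_check_line line (check_line line)

-- ===== LEMMAS AND PROOFS =====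
theorem pvEveryOther_cons (x : String) (r : List String) :
    pvEveryOther (x :: r) = x :: pvEveryOther (r.drop 1) := by
  cases r <;> rfl

theorem pvAlt_cons_cons (a b : String) (r : List String) :
    check_line_alt (a :: b :: r) = ((!pvIsOperator a && pvIsOperator b) && check_line_alt r) := by
  unfold check_line_alt
  rw [show pvEveryOther (a :: b :: r) = a :: pvEveryOther r from rfl,
      show (a :: b :: r).drop 1 = b :: r from rfl, pvEveryOther_cons b r]
  have hm : (a :: b :: r).length % 2 = r.length % 2 := by
    simp [List.length_cons]; omega
  rw [hm]
  by_cases h : r.length % 2 = 0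
  · simp [h]
  · simp [h]
    cases pvIsOperator a <;> cases pvIsOperator b <;>
      simp [Bool.and_comm]

theorem pvLoop_eq_alt : ∀ (l : List String), pvCheckLoop l 0 = check_line_alt l := by
  intro l
  induction l using pvEveryOther.induct with
  | case1 => decide
  | case2 a =>
    by_cases h : pvIsOperator a = true <;>
      simp [pvCheckLoop, check_line_alt, pvEveryOther, h]
  | case3 a b r ih =>
    rw [pvAlt_cons_cons]
    by_cases ha : pvIsOperator a = true
    · simp [pvCheckLoop, ha]
    · by_cases hb : pvIsOperator b = true
      · simpa [pvCheckLoop, ha, hb] using ih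
      · simp [pvCheckLoop, ha, hb]

-- ===== VERDICT (by name: the statement is the Claim_ definition above) =====
theorem check_line_spec : Claim_equal_check_line := by
  intro line _
  unfold Spec_check_line check_line
  exact pvLoop_eq_alt line
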